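-- pv_equiv track=rewrite | github.com/VisLab/HEDToolsArchived | python/webinterface/webinterface/__init__.py | _get_the_number_of_rows_with_validation_issues
-- ===== SOURCE A (Python) =====
-- def _get_the_number_of_rows_with_validation_issues(validation_issues):
--     """Gets the number of rows in the spreadsheet that has validation issues.
--
--     Parameters
--     ----------
--     validation_issues: string
--         A string containing the validation issues found in the spreadsheet.
--
--     Returns
--     -------
--         integer
--         A integer representing the number of spreadsheet rows that had validation issues.
--     """
--     number_of_rows_with_issues = 0;
--     split_validation_issues = validation_issues.split('\n');
--     if split_validation_issues != ['']:
--         for validation_issue_line in split_validation_issues: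
--             if not validation_issue_line.startswith('\t'):
--                 number_of_rows_with_issues += 1;
--     return number_of_rows_with_issues;
-- ===== SOURCE B (Python) =====
-- def _get_the_number_of_rows_with_validation_issues(validation_issues):
--     """Count spreadsheet rows with validation issues via substring scans
--     instead of splitting into a list of lines and looping over it."""
--     if not validation_issues:
--         return 0
--     total_lines = validation_issues.count('\n') + 1
--     tab_started = (1 if validation_issues.startswith('\t') else 0) + validation_issues.count('\n\t')
--     return total_lines - tab_started
-- ===== Notes on version B (the rewrite author's own statement) =====
-- stated objective: alternative
-- what changed: Replaces split-into-lines plus a per-line startswith loop by direct substring counting on the raw string: total lines = newline count plus one, tab-started lines = a leading-tab check plus the count of newline-followed-by-tab substrings, returning their difference.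
import Mathlib
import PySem

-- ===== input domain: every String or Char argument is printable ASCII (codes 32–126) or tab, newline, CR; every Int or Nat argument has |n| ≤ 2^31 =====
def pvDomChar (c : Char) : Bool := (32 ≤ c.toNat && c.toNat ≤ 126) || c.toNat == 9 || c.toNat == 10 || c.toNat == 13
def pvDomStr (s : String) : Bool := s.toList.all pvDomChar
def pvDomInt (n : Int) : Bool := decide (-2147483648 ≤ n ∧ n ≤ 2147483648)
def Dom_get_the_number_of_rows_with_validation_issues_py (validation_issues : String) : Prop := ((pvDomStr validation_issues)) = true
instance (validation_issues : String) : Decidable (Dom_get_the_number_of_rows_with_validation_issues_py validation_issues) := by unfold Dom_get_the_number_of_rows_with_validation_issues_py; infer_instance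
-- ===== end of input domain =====

-- ===== PORT A =====
-- B replaces A's split-into-lines loop by substring counts on the raw string (alternative decomposition, same cost).
def get_the_number_of_rows_with_validation_issues_py (validation_issues : String) : Int :=
  match PySem.Str.split? validation_issues "\n" with
  | none => 0  -- unreachable: the separator "\n" is non-empty
  | some split_validation_issues =>
    if split_validation_issues ≠ [""] then
      split_validation_issues.foldl
        (fun acc line => if ¬ PySem.Str.startswith line "\t" then acc + 1 else acc) 0
    else 0

-- ===== PORT B =====
def get_the_number_of_rows_with_validation_issues_py_alt (validation_issues : String) : Int :=
  if validation_issues = "" then 0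
  else
    ((PySem.Str.count validation_issues "\n" : Int) + 1)
      - ((if PySem.Str.startswith validation_issues "\t" then 1 else 0)
          + (PySem.Str.count validation_issues "\n\t" : Int))

-- ===== PRECONDITION & SPEC =====
def Spec_get_the_number_of_rows_with_validation_issues_py (validation_issues : String) (out : Int) : Prop := out = get_the_number_of_rows_with_validation_issues_py_alt validation_issues
instance (validation_issues : String) (out : Int) : Decidable (Spec_get_the_number_of_rows_with_validation_issues_py validation_issues out) := by unfold Spec_get_the_number_of_rows_with_validation_issues_py; infer_instance

-- ===== CLAIM (what is proved, stated in full; the proofs are below) =====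
def Claim_equal_get_the_number_of_rows_with_validation_issues_py : Prop := ∀ (validation_issues : String), Dom_get_the_number_of_rows_with_validation_issues_py validation_issues → Spec_get_the_number_of_rows_with_validation_issues_py validation_issues (get_the_number_of_rows_with_validation_issues_py validation_issues)

-- ===== LEMMAS AND PROOFS =====

/-- Structural count of non-overlapping occurrences of "\n\t". -/
def pvCnt2 : List Char → Nat
  | [] => 0
  | [_] => 0
  | a :: b :: r => if a = '\n' ∧ b = '\t' then 1 + pvCnt2 r else pvCnt2 (b :: r)


lemma pv_count_go_nl : ∀ (fuel : Nat) (l : List Char) (acc : Nat), l.length ≤ fuel →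
    PySem.Chars.count.go ['\n'] fuel l acc = acc + l.count '\n' := by
  intro fuel
  induction fuel with
  | zero =>
    intro l acc h
    have : l = [] := List.eq_nil_of_length_eq_zero (Nat.le_zero.mp h)
    subst this
    simp [PySem.Chars.count.go]
  | succ n ih =>
    intro l acc h
    cases l with
    | nil => simp [PySem.Chars.count.go]
    | cons c rest =>
      simp only [PySem.Chars.count.go]
      by_cases hc : c = '\n'
      · subst hc
        have hp : (['\n'].isPrefixOf ('\n' :: rest)) = true := by simp [List.isPrefixOf]
        rw [hp]
        simp only [if_true, List.length_cons, List.drop_succ_cons, List.length_nil, List.drop_zero]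
        rw [ih rest (acc+1) (by simpa using h)]
        simp
        omega
      · have hp : (['\n'].isPrefixOf (c :: rest)) = false := by
          simp [List.isPrefixOf]
          exact fun h' => absurd h'.symm hc
        rw [hp]
        simp only [if_false, Bool.false_eq_true]
        rw [ih rest acc (by simpa using h)]
        have : ¬ (c == '\n') = true := by simp; exact hc
        simp [List.count_cons, this]

lemma pv_count_go_nt : ∀ (fuel : Nat) (l : List Char) (acc : Nat), l.length ≤ fuel →
    PySem.Chars.count.go ['\n', '\t'] fuel l acc = acc + pvCnt2 l := by
  intro fuel
  induction fuel with
  | zero =>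
    intro l acc h
    have : l = [] := List.eq_nil_of_length_eq_zero (Nat.le_zero.mp h)
    subst this
    simp [PySem.Chars.count.go, pvCnt2]
  | succ n ih =>
    intro l acc h
    match l with
    | [] => simp [PySem.Chars.count.go, pvCnt2]
    | [c] =>
      have hp : (['\n', '\t'].isPrefixOf [c]) = false := by simp [List.isPrefixOf]
      simp only [PySem.Chars.count.go, hp, Bool.false_eq_true, if_false]
      rw [ih [] acc (by simp)]
      simp [pvCnt2]
    | a :: b :: r =>
      by_cases hab : a = '\n' ∧ b = '\t'
      · obtain ⟨ha, hb⟩ := hab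
        subst ha; subst hb
        have hp : (['\n', '\t'].isPrefixOf ('\n' :: '\t' :: r)) = true := by
          simp [List.isPrefixOf]
        simp only [PySem.Chars.count.go, hp, if_true]
        have hl : (List.drop ['\n', '\t'].length ('\n' :: '\t' :: r)) = r := by simp
        rw [hl, ih r (acc+1) (by simp at h; omega)]
        simp [pvCnt2]
        omega
      · have hp : (['\n', '\t'].isPrefixOf (a :: b :: r)) = false := by
          simp [List.isPrefixOf]
          intro h1 h2
          exact absurd ⟨h1.symm, h2.symm⟩ hab
        simp only [PySem.Chars.count.go, hp, Bool.false_eq_true, if_false]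
        rw [ih (b :: r) acc (by simp at h ⊢; omega)]
        simp [pvCnt2, hab]


lemma pv_splitOn_go_nl : ∀ (fuel : Nat) (l cur : List Char) (acc : List (List Char)),
    l.length ≤ fuel →
    PySem.Chars.splitOn.go ['\n'] fuel l cur acc
      = acc.reverse ++ (l.splitOn '\n').modifyHead (cur.reverse ++ ·) := by
  intro fuel
  induction fuel with
  | zero =>
    intro l cur acc h
    have : l = [] := List.eq_nil_of_length_eq_zero (Nat.le_zero.mp h)
    subst this
    simp [PySem.Chars.splitOn.go, List.splitOn, List.splitOnP_nil]
  | succ n ih =>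
    intro l cur acc h
    cases l with
    | nil => simp [PySem.Chars.splitOn.go, List.splitOn, List.splitOnP_nil]
    | cons c rest =>
      by_cases hc : c = '\n'
      · subst hc
        have hp : (['\n'].isPrefixOf ('\n' :: rest)) = true := by simp [List.isPrefixOf]
        simp only [PySem.Chars.splitOn.go, hp, if_true, List.length_cons, List.drop_succ_cons,
          List.length_nil, List.drop_zero]
        rw [ih rest [] ((cur.reverse) :: acc) (by simpa using h)]
        simp [List.splitOn, List.splitOnP_cons]
        cases List.splitOnP (fun x => x == '\n') rest <;> simp
      · have hp : (['\n'].isPrefixOf (c :: rest)) = false := by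
          simp [List.isPrefixOf]
          exact fun h' => absurd h'.symm hc
        simp only [PySem.Chars.splitOn.go, hp, Bool.false_eq_true, if_false]
        rw [ih rest (c :: cur) acc (by simpa using h)]
        have hcne : (c == '\n') = false := by simp; exact hc
        simp only [List.splitOn, List.splitOnP_cons, hcne, Bool.false_eq_true, if_false]
        congr 1
        cases hL : List.splitOnP (fun x => x == '\n') rest with
        | nil => simp
        | cons l0 L' => simp

lemma pv_splitOn_char (t : List Char) : PySem.Chars.splitOn t ['\n'] = t.splitOn '\n' := by
  rw [PySem.Chars.splitOn, pv_splitOn_go_nl (t.length + 1) t [] [] (by omega)]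
  cases t.splitOn '\n' <;> simp

lemma pv_tabpf (c : Char) (x : List Char) : ['\t'].isPrefixOf (c :: x) = (c == '\t') := by
  simp [List.isPrefixOf, eq_comm]

lemma pv_cnt2_cons (c : Char) (t : List Char) (hc : c ≠ '\n') :
    pvCnt2 (c :: t) = pvCnt2 t := by
  cases t with
  | nil => simp [pvCnt2]
  | cons b r =>
    have : ¬ (c = '\n' ∧ b = '\t') := fun h => hc h.1
    simp [pvCnt2, this]

lemma pv_cnt2_nl (t : List Char) :
    pvCnt2 ('\n' :: t) = (if ['\t'].isPrefixOf t then 1 else 0) + pvCnt2 t := by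
  cases t with
  | nil => simp [pvCnt2, List.isPrefixOf]
  | cons b r =>
    rw [pv_tabpf]
    by_cases hb : b = '\t'
    · subst hb
      rw [pv_cnt2_cons '\t' r (by decide)]
      simp [pvCnt2]
    · have h1 : ¬ ('\n' = '\n' ∧ b = '\t') := fun h => hb h.2
      have h2 : (b == '\t') = false := by simp; exact hb
      simp [pvCnt2, hb, h2]

lemma pv_firstline_tab (t : List Char) :
    ['\t'].isPrefixOf ((t.splitOn '\n').headI) = ['\t'].isPrefixOf t := by
  cases t with
  | nil => simp [List.splitOn, List.splitOnP_nil]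
  | cons c rest =>
    by_cases hc : c = '\n'
    · subst hc
      simp [List.splitOn, List.splitOnP_cons, List.isPrefixOf]
    · have hcne : (c == '\n') = false := by simp; exact hc
      simp only [List.splitOn, List.splitOnP_cons, hcne, Bool.false_eq_true, if_false]
      obtain ⟨l0, L', hL⟩ := List.exists_cons_of_ne_nil (List.splitOnP_ne_nil (fun x => x == '\n') rest)
      rw [hL]
      simp [pv_tabpf]

lemma pv_main (t : List Char) :
    (t.splitOn '\n').countP (fun l => !(['\t'].isPrefixOf l))
      + (if ['\t'].isPrefixOf t then 1 else 0) + pvCnt2 t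
      = t.count '\n' + 1 := by
  induction t with
  | nil => simp [List.splitOn, List.splitOnP_nil, List.isPrefixOf, pvCnt2]
  | cons c rest ih =>
    by_cases hc : c = '\n'
    · subst hc
      simp only [List.splitOn, List.splitOnP_cons, beq_self_eq_true, if_true] at ih ⊢
      rw [List.countP_cons, pv_cnt2_nl, pv_tabpf, List.count_cons]
      simp only [List.isPrefixOf, Bool.not_false, if_true, beq_self_eq_true]
      have hnt : (('\n' : Char) == '\t') = false := by decide
      rw [hnt]
      simp only [Bool.false_eq_true, if_false]
      omega
    · have hcne : (c == '\n') = false := by simp; exact hc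
      simp only [List.splitOn, List.splitOnP_cons, hcne, Bool.false_eq_true, if_false] at ih ⊢
      obtain ⟨l0, L', hL⟩ := List.exists_cons_of_ne_nil (List.splitOnP_ne_nil (fun x => x == '\n') rest)
      rw [hL] at ih ⊢
      have hhead : ['\t'].isPrefixOf l0 = ['\t'].isPrefixOf rest := by
        have := pv_firstline_tab rest
        simp only [List.splitOn, hL, List.headI] at this
        exact this
      simp only [List.modifyHead_cons, List.countP_cons] at ih ⊢
      rw [pv_cnt2_cons c rest hc, List.count_cons, hcne]
      rw [hhead] at ih
      rw [pv_tabpf c rest, pv_tabpf c l0]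
      by_cases ht : c = '\t'
      · subst ht
        simp only [BEq.refl, Bool.not_true, Bool.false_eq_true, if_false, if_true] at ih ⊢
        cases hpr : ['\t'].isPrefixOf rest <;> simp [hpr] at ih ⊢ <;> omega
      · have h1 : (c == '\t') = false := by simp; exact ht
        rw [h1]
        simp only [Bool.not_false, Bool.false_eq_true, if_false, if_true] at ih ⊢
        cases hpr : ['\t'].isPrefixOf rest <;> simp [hpr] at ih ⊢ <;> omega

lemma pv_splitOn_eq_nilsingleton_iff (t : List Char) : t.splitOn '\n' = [[]] ↔ t = [] := by
  constructor
  · intro h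
    cases t with
    | nil => rfl
    | cons c rest =>
      exfalso
      by_cases hc : c = '\n'
      · subst hc
        simp only [List.splitOn, List.splitOnP_cons, beq_self_eq_true, if_true] at h
        obtain ⟨l0, L', hL⟩ := List.exists_cons_of_ne_nil (List.splitOnP_ne_nil (fun x => x == '\n') rest)
        rw [hL] at h
        simp at h
      · have hcne : (c == '\n') = false := by simp; exact hc
        simp only [List.splitOn, List.splitOnP_cons, hcne, Bool.false_eq_true, if_false] at h
        obtain ⟨l0, L', hL⟩ := List.exists_cons_of_ne_nil (List.splitOnP_ne_nil (fun x => x == '\n') rest)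
        rw [hL] at h
        simp at h
  · rintro rfl
    simp [List.splitOn, List.splitOnP_nil]

lemma pv_equiv (s : String) : get_the_number_of_rows_with_validation_issues_py s = get_the_number_of_rows_with_validation_issues_py_alt s := by
  have hsep : ("\n" : String).toList = ['\n'] := by decide
  have hsep2 : ("\n\t" : String).toList = ['\n', '\t'] := by decide
  have htab : ("\t" : String).toList = ['\t'] := by decide
  unfold get_the_number_of_rows_with_validation_issues_py
  rw [PySem.Str.split?]
  rw [hsep]
  rw [PySem.Chars.split?]
  simp only [List.isEmpty_cons, Bool.false_eq_true, if_false, Option.map_some]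
  rw [pv_splitOn_char]
  by_cases hs : s = ""
  · subst hs
    have : (("" : String).toList.splitOn '\n') = [[]] := by decide
    rw [this]
    simp [get_the_number_of_rows_with_validation_issues_py_alt]
  · have ht : s.toList ≠ [] := fun h => hs (String.toList_eq_nil_iff.mp h)
    have hne : (s.toList.splitOn '\n').map String.ofList ≠ [""] := by
      intro h
      apply ht
      rw [← pv_splitOn_eq_nilsingleton_iff]
      cases hL : s.toList.splitOn '\n' with
      | nil => exact absurd hL (List.splitOnP_ne_nil _ _)
      | cons l0 L' =>
        rw [hL] at h
        cases L' with
        | nil =>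
          simp only [List.map_cons, List.map_nil, List.cons.injEq, and_true] at h
          have : l0 = ("" : String).toList := by rw [← h]; simp [String.toList_ofList]
          simp at this
          simp [this]
        | cons l1 L'' => simp at h
    rw [if_pos hne]
    rw [PySem.List.foldl_ite_add_one]
    unfold get_the_number_of_rows_with_validation_issues_py_alt
    rw [if_neg hs]
    -- counts
    rw [PySem.Str.count_eq, PySem.Str.count_eq, hsep, hsep2, PySem.Str.startswith_eq, htab]
    rw [PySem.Chars.count, PySem.Chars.count]
    simp only [List.isEmpty_cons, Bool.false_eq_true, if_false]
    rw [pv_count_go_nl s.toList.length s.toList 0 le_rfl,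
        pv_count_go_nt s.toList.length s.toList 0 le_rfl]
    -- countP over map
    rw [List.countP_map]
    have hpred : ((fun x => decide ¬PySem.Str.startswith x "\t" = true) ∘ String.ofList)
        = (fun l => !(['\t'].isPrefixOf l)) := by
      funext l
      simp only [Function.comp, PySem.Str.startswith_eq, htab, PySem.Chars.startswith,
        String.toList_ofList]
      cases h : ['\t'].isPrefixOf l <;> simp
    rw [hpred]
    have hst : PySem.Chars.startswith s.toList ['\t'] = ['\t'].isPrefixOf s.toList := rfl
    rw [hst]
    have := pv_main s.toList
    cases hpr : ['\t'].isPrefixOf s.toList <;> rw [hpr] at this <;> simp at this ⊢ <;> omega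

-- ===== VERDICT (by name: the statement is the Claim_ definition above) =====
theorem get_the_number_of_rows_with_validation_issues_py_spec : Claim_equal_get_the_number_of_rows_with_validation_issues_py := by
  intro s _
  unfold Spec_get_the_number_of_rows_with_validation_issues_py
  exact pv_equiv s
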